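-- pv_equiv track=rewrite | github.com/project-basileus/multitype-sequence-generation-by-tlstm-gan | sgtlstm/oracle.py | check_all_combinations
-- ===== SOURCE A (Python) =====
-- from collections import Counter, defaultdict
-- from collections import Counter
-- from itertools import combinations
--
-- def check_all_combinations(rule_dict):
--     rules = [1, 2, 3, 4, 5, 6]
--     combs = set()
--     comb_dict = defaultdict(Counter)
--
--     for k in range(1, len(rules) + 1):
--         combs.update(set(combinations(rules, k)))
--
--     for i, rule_list in rule_dict.items():
--         for c in combs:
--             if set(c).issubset(set(rule_list)):
--                 comb_dict[i][c] += 1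
--
--     return comb_dict
-- ===== SOURCE B (Python) =====
-- from itertools import combinations
--
--
-- def check_all_combinations(rule_dict):
--     out = {}
--     for i, rule_list in rule_dict.items():
--         rset = set(rule_list)
--         elems = [r for r in range(1, 7) if r in rset]
--         if elems:
--             out[i] = {c: 1 for k in range(1, len(elems) + 1)
--                       for c in combinations(elems, k)}
--     return out
-- ===== Notes on version B (the rewrite author's own statement) =====
-- stated objective: faster
-- what changed: Instead of testing all 63 subsets of {1..6} against set(rule_list) for every key, B intersects each rule list with {1..6} once and directly enumerates only the combinations of that (usually small) intersection, assigning count 1 with no subset tests or Counter increments.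
import Mathlib
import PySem

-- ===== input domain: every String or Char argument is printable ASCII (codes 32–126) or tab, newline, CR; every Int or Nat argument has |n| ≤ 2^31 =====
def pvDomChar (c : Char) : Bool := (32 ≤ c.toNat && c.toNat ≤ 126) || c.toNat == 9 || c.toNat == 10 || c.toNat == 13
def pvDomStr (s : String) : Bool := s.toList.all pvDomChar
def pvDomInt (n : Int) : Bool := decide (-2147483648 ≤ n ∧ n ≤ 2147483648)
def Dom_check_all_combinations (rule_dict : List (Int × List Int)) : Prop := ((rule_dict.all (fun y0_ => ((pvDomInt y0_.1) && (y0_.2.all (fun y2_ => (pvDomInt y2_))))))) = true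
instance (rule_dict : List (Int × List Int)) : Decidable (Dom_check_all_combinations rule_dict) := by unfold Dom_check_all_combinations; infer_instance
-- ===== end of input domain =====

-- B computes each key's intersection with {1..6} once and enumerates only the combinations of
-- that intersection, instead of A's 63 per-key subset tests (objective: faster, constant factor).

-- itertools.combinations(l, k) in lexicographic order (combinatorial helper shared by both ports)
def pvCombos : List Int → Nat → List (List Int)
  | _, 0 => [[]]
  | [], _ + 1 => []
  | x :: xs, k + 1 => (pvCombos xs k).map (fun c => x :: c) ++ pvCombos xs (k + 1)

-- ===== PORT A =====
def check_all_combinations (rule_dict : List (Int × List Int)) : List (Int × List (List Int × Int)) :=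
  let rules : List Int := [1, 2, 3, 4, 5, 6]
  let combs : PySem.Set (List Int) :=
    (PySem.List.pyRange 1 ((rules.length : Int) + 1) 1).foldl
      (fun s k => PySem.Set.update s (PySem.Set.ofList (pvCombos rules k.toNat)))
      PySem.Set.empty
  let comb_dict : PySem.Dict Int (PySem.Dict (List Int) Int) :=
    rule_dict.foldl
      (fun cd p =>
        combs.foldl
          (fun cd c =>
            if PySem.Set.issubset (PySem.Set.ofList c) (PySem.Set.ofList p.2) then
              cd.insert p.1 ((cd.getD p.1 PySem.Dict.empty).modify c 0 (· + 1))
            else cd)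
          cd)
      PySem.Dict.empty
  comb_dict.items.map (fun q => (q.1, q.2.items))

-- ===== PORT B =====
def check_all_combinations_alt (rule_dict : List (Int × List Int)) : List (Int × List (List Int × Int)) :=
  let out : PySem.Dict Int (PySem.Dict (List Int) Int) :=
    rule_dict.foldl
      (fun out p =>
        let rset := PySem.Set.ofList p.2
        let elems := (PySem.List.pyRange 1 7 1).filter (fun r => PySem.Set.contains rset r)
        if elems ≠ [] then
          out.insert p.1 (PySem.Dict.ofList
            ((PySem.List.pyRange 1 ((elems.length : Int) + 1) 1).flatMap
              (fun k => (pvCombos elems k.toNat).map (fun c => (c, (1 : Int))))))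
        else out)
      PySem.Dict.empty
  out.items.map (fun q => (q.1, q.2.items))

-- ===== PRECONDITION & SPEC =====
-- The argument stands for a Python dict, whose keys are necessarily distinct; a duplicate-key
-- association list corresponds to no Python input, so Pre_ only requires distinct keys.
def Pre_check_all_combinations (rule_dict : List (Int × List Int)) : Prop :=
  (rule_dict.map Prod.fst).Nodup
instance (rule_dict : List (Int × List Int)) : Decidable (Pre_check_all_combinations rule_dict) := by
  unfold Pre_check_all_combinations; infer_instance
def pvWitness_check_all_combinations : (List (Int × List Int)) := [(1, [1, 2, 7]), (2, [])]
def Spec_check_all_combinations (rule_dict : List (Int × List Int)) (out : List (Int × List (List Int × Int))) : Prop := out = check_all_combinations_alt rule_dict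
instance (rule_dict : List (Int × List Int)) (out : List (Int × List (List Int × Int))) : Decidable (Spec_check_all_combinations rule_dict out) := by unfold Spec_check_all_combinations; infer_instance

-- ===== CLAIM (what is proved, stated in full; the proofs are below) =====
def Claim_equal_check_all_combinations : Prop := ∀ (rule_dict : List (Int × List Int)), Dom_check_all_combinations rule_dict → Pre_check_all_combinations rule_dict → Spec_check_all_combinations rule_dict (check_all_combinations rule_dict)

-- ===== LEMMAS AND PROOFS =====
def pvAll : List (List Int) :=
  (PySem.List.pyRange 1 7 1).flatMap (fun k => pvCombos [1, 2, 3, 4, 5, 6] k.toNat)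

def pvPred (rl : List Int) : List Int → Bool := fun c => c.all (fun e => decide (e ∈ rl))

def pvMatched (rl : List Int) : List (List Int) := pvAll.filter (pvPred rl)

def pvElems (rl : List Int) : List Int :=
  (PySem.List.pyRange 1 7 1).filter (fun r => decide (r ∈ rl))

def pvEntry (p : Int × List Int) : Option (Int × List (List Int × Int)) :=
  if pvMatched p.2 = [] then none
  else some (p.1, (pvMatched p.2).map (fun c => (c, (1 : Int))))

set_option maxRecDepth 8000 in
lemma pvAll_nodup : pvAll.Nodup := by decide

set_option maxRecDepth 100000 in
lemma pvCombsSet_eq :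
    (PySem.List.pyRange 1 (((([1,2,3,4,5,6] : List Int)).length : Int) + 1) 1).foldl
      (fun s k => PySem.Set.update s (PySem.Set.ofList (pvCombos [1,2,3,4,5,6] k.toNat)))
      PySem.Set.empty = pvAll := by decide

lemma pvIssubset_eq (c rl : List Int) :
    PySem.Set.issubset (PySem.Set.ofList c) (PySem.Set.ofList rl) = pvPred rl c := by
  rw [Bool.eq_iff_iff]
  simp [PySem.Set.issubset_iff, PySem.Set.mem_ofList, List.all_eq_true, pvPred]

lemma pvContains_ofList (rl : List Int) (r : Int) :
    PySem.Set.contains (PySem.Set.ofList rl) r = decide (r ∈ rl) := by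
  rw [Bool.eq_iff_iff]
  simp [PySem.Set.mem_ofList]

lemma pvCombos_filter (p : Int → Bool) (l : List Int) (k : Nat) :
    (pvCombos l k).filter (fun c => c.all p) = pvCombos (l.filter p) k := by
  induction l generalizing k with
  | nil => cases k <;> simp [pvCombos]
  | cons x xs ih =>
    cases k with
    | zero => simp [pvCombos]
    | succ k =>
      have hcomp : ((fun c => c.all p) ∘ fun c => x :: c) = fun c => p x && c.all p := by
        funext c; simp
      simp only [pvCombos, List.filter_append, List.filter_map, hcomp]
      by_cases hx : p x
      · simp [hx, ih, pvCombos]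
      · simp [hx, ih]

lemma pvCombos_nil_of_lt (l : List Int) (k : Nat) (h : l.length < k) : pvCombos l k = [] := by
  induction l generalizing k with
  | nil =>
    cases k with
    | zero => omega
    | succ k => rfl
  | cons x xs ih =>
    cases k with
    | zero => omega
    | succ k =>
      simp only [List.length_cons] at h
      simp [pvCombos, ih k (by omega), ih (k + 1) (by omega)]

-- counter loop over fresh distinct keys appends (c, 1) for each kept c
lemma pvCounter_items (p : List Int → Bool) (m : List (List Int))
    (d : PySem.Dict (List Int) Int) (hn : m.Nodup)
    (hf : ∀ c ∈ m, d.contains c = false) :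
    (m.foldl (fun w c => if p c then w.modify c 0 (· + 1) else w) d).items
      = d.items ++ (m.filter p).map (fun c => (c, (1 : Int))) := by
  induction m generalizing d with
  | nil => simp
  | cons c rest ih =>
    have hfr : d.contains c = false := hf c (by simp)
    by_cases hc : p c
    · have hmod : d.modify c 0 (· + 1) = d.insert c (1 : Int) := by
        show d.insert c (d.getD c 0 + 1) = d.insert c 1
        rw [PySem.Dict.getD_of_not_contains (h := hfr)]
        norm_num
      simp only [List.foldl_cons, hc, if_pos, List.filter_cons_of_pos, hmod]
      rw [ih (d.insert c 1) (List.Nodup.of_cons hn)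
        (by
          intro c' hc'
          have hne : c' ≠ c := by
            rintro rfl; exact (List.nodup_cons.mp hn).1 hc'
          rw [PySem.Dict.contains_insert]
          simp [hne, hf c' (by simp [hc'])])]
      rw [PySem.Dict.items_insert_of_not_contains (h := hfr)]
      simp
    · rw [List.foldl_cons, if_neg (by simp [hc]), List.filter_cons_of_neg (by simp [hc])]
      exact ih d (List.Nodup.of_cons hn) (fun c' hc' => hf c' (by simp [hc']))

-- once key i holds a counter, the inner loop only updates that counter
lemma pvInner_shift (p : List Int → Bool) (i : Int) (combs : List (List Int))
    (cd : PySem.Dict Int (PySem.Dict (List Int) Int)) (inner : PySem.Dict (List Int) Int) :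
    combs.foldl
        (fun cd c =>
          if p c then cd.insert i ((cd.getD i PySem.Dict.empty).modify c 0 (· + 1)) else cd)
        (cd.insert i inner)
      = cd.insert i
          (combs.foldl (fun w c => if p c then w.modify c 0 (· + 1) else w) inner) := by
  induction combs generalizing inner with
  | nil => simp
  | cons c rest ih =>
    by_cases hc : p c
    · rw [List.foldl_cons, if_pos hc, List.foldl_cons, if_pos hc,
        PySem.Dict.getD_insert_self, PySem.Dict.insert_insert_self, ih]
    · rw [List.foldl_cons, if_neg (by simp [hc]), List.foldl_cons, if_neg (by simp [hc]), ih]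

-- one outer iteration on a fresh key i
lemma pvEntry_step (p : List Int → Bool) (i : Int) (combs : List (List Int))
    (cd : PySem.Dict Int (PySem.Dict (List Int) Int)) (hn : combs.Nodup)
    (hi : cd.contains i = false) :
    combs.foldl
        (fun cd c =>
          if p c then cd.insert i ((cd.getD i PySem.Dict.empty).modify c 0 (· + 1)) else cd)
        cd
      = if combs.filter p = [] then cd
        else cd.insert i (PySem.Dict.mk ((combs.filter p).map (fun c => (c, (1 : Int))))) := by
  induction combs with
  | nil => simp
  | cons c rest ih =>
    by_cases hc : p c
    · rw [List.foldl_cons, if_pos hc, List.filter_cons_of_pos hc]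
      have h0 : cd.getD i PySem.Dict.empty = PySem.Dict.empty :=
        PySem.Dict.getD_of_not_contains cd PySem.Dict.empty hi
      have h1 : (cd.getD i PySem.Dict.empty).modify c 0 (· + 1)
          = PySem.Dict.mk [(c, (1 : Int))] := by
        rw [h0]
        show PySem.Dict.empty.insert c ((PySem.Dict.empty.getD c 0) + 1) = _
        rw [PySem.Dict.getD_empty]
        norm_num
        rfl
      rw [h1, pvInner_shift]
      have h2 : (rest.foldl (fun w c => if p c then w.modify c 0 (· + 1) else w)
            (PySem.Dict.mk [(c, (1 : Int))])).items
          = [(c, (1 : Int))] ++ (rest.filter p).map (fun c => (c, (1 : Int))) := by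
        rw [pvCounter_items p rest (PySem.Dict.mk [(c, (1 : Int))]) (List.Nodup.of_cons hn)
          (by
            intro c' hc'
            have hne : c' ≠ c := by
              rintro rfl; exact (List.nodup_cons.mp hn).1 hc'
            simp [PySem.Dict.contains_mk, hne.symm])]
      have h3 : rest.foldl (fun w c => if p c then w.modify c 0 (· + 1) else w)
            (PySem.Dict.mk [(c, (1 : Int))])
          = PySem.Dict.mk ((c :: rest.filter p).map (fun c => (c, (1 : Int)))) := by
        apply PySem.Dict.ext
        rw [h2]
        rfl
      rw [h3]
      simp
    · rw [List.foldl_cons, if_neg (by simp [hc]), List.filter_cons_of_neg (by simp [hc])]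
      exact ih (List.Nodup.of_cons hn)

-- A's outer loop over distinct fresh keys
lemma pvOuter_A (rest : List (Int × List Int))
    (cd : PySem.Dict Int (PySem.Dict (List Int) Int))
    (hn : (rest.map Prod.fst).Nodup)
    (hf : ∀ j ∈ rest.map Prod.fst, cd.contains j = false) :
    ((rest.foldl
        (fun cd p =>
          pvAll.foldl
            (fun cd c =>
              if pvPred p.2 c then
                cd.insert p.1 ((cd.getD p.1 PySem.Dict.empty).modify c 0 (· + 1))
              else cd)
            cd)
        cd).items).map (fun q => (q.1, q.2.items))
      = cd.items.map (fun q => (q.1, q.2.items)) ++ rest.filterMap pvEntry := by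
  induction rest generalizing cd with
  | nil => simp
  | cons p rest ih =>
    rw [List.map_cons] at hn
    have hp : cd.contains p.1 = false := hf p.1 (by simp)
    rw [List.foldl_cons, pvEntry_step (pvPred p.2) p.1 pvAll cd pvAll_nodup hp]
    by_cases hm : pvMatched p.2 = []
    · rw [if_pos (by simpa [pvMatched] using hm)]
      rw [ih cd hn.of_cons (fun j hj => hf j (by simp [hj]))]
      have : pvEntry p = none := by simp [pvEntry, hm]
      rw [List.filterMap_cons, this]
    · rw [if_neg (by simpa [pvMatched] using hm)]
      rw [ih (cd.insert p.1 (PySem.Dict.mk ((pvAll.filter (pvPred p.2)).map (fun c => (c, (1 : Int))))))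
        hn.of_cons
        (by
          intro j hj
          have hne : j ≠ p.1 := by
            rintro rfl
            exact (List.nodup_cons.mp hn).1 hj
          simp [PySem.Dict.contains_insert, hne, hf j (by simp [hj])])]
      rw [PySem.Dict.items_insert_of_not_contains (h := hp)]
      have : pvEntry p
          = some (p.1, (pvMatched p.2).map (fun c => (c, (1 : Int)))) := by
        simp [pvEntry, hm]
      rw [List.filterMap_cons, this]
      simp [pvMatched]

lemma pvElems_len_le (rl : List Int) : (pvElems rl).length ≤ 6 := by
  have h := List.length_filter_le (fun r => decide (r ∈ rl)) (PySem.List.pyRange 1 7 1)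
  simpa [pvElems] using h.trans (by norm_num [PySem.List.length_pyRange_one])

lemma pvMatched_eq (rl : List Int) :
    pvMatched rl
      = (PySem.List.pyRange 1 (((pvElems rl).length : Int) + 1) 1).flatMap
          (fun k => pvCombos (pvElems rl) k.toNat) := by
  have hbase : ([1, 2, 3, 4, 5, 6] : List Int) = PySem.List.pyRange 1 7 1 := by decide
  have h1 : pvMatched rl
      = (PySem.List.pyRange 1 7 1).flatMap (fun k => pvCombos (pvElems rl) k.toNat) := by
    simp only [pvMatched, pvAll, List.filter_flatMap]
    refine List.flatMap_congr ?_ 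
    intro k hk
    have := pvCombos_filter (fun e => decide (e ∈ rl)) [1, 2, 3, 4, 5, 6] k.toNat
    simpa [pvPred, pvElems, ← hbase] using this
  rw [h1]
  have hm : ((pvElems rl).length : Int) + 1 ≤ 7 := by
    have := pvElems_len_le rl; omega
  rw [PySem.List.pyRange_one_append 1 (((pvElems rl).length : Int) + 1) 7 (by omega) hm,
    List.flatMap_append]
  have h2 : (PySem.List.pyRange (((pvElems rl).length : Int) + 1) 7 1).flatMap
      (fun k => pvCombos (pvElems rl) k.toNat) = [] := by
    rw [List.flatMap_eq_nil_iff]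
    intro k hk
    rw [PySem.List.mem_pyRange_one] at hk
    exact pvCombos_nil_of_lt _ _ (by omega)
  rw [h2, List.append_nil]

lemma pvMatched_nil_iff (rl : List Int) : pvMatched rl = [] ↔ pvElems rl = [] := by
  rw [pvMatched_eq]
  cases h : pvElems rl with
  | nil => simp [PySem.List.pyRange_one_eq_nil]
  | cons e es =>
    constructor
    · intro hc
      exfalso
      have hlen : (1 : Int) < ((e :: es).length : Int) + 1 := by
        simp only [List.length_cons]; push_cast; omega
      rw [PySem.List.pyRange_one_cons (by omega)] at hc
      simp [pvCombos] at hc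
    · intro hc; cases hc

lemma pvDict_ofList_fresh {κ ν : Type} [BEq κ] [LawfulBEq κ] (pairs : List (κ × ν))
    (d : PySem.Dict κ ν) (hn : (pairs.map Prod.fst).Nodup)
    (hf : ∀ j ∈ pairs.map Prod.fst, d.contains j = false) :
    (pairs.foldl (fun d p => d.insert p.1 p.2) d).items = d.items ++ pairs := by
  induction pairs generalizing d with
  | nil => simp
  | cons p rest ih =>
    rw [List.map_cons] at hn
    have hp : d.contains p.1 = false := hf p.1 (by simp)
    rw [List.foldl_cons, ih (d.insert p.1 p.2) hn.of_cons
      (by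
        intro j hj
        have hne : j ≠ p.1 := by
          rintro rfl; exact (List.nodup_cons.mp hn).1 hj
        simp [PySem.Dict.contains_insert, hne, hf j (by simp [hj])]),
      PySem.Dict.items_insert_of_not_contains (h := hp)]
    simp

lemma pvMatched_nodup (rl : List Int) : (pvMatched rl).Nodup :=
  pvAll_nodup.filter _

-- B's outer loop over distinct fresh keys
lemma pvOuter_B (rest : List (Int × List Int))
    (out : PySem.Dict Int (PySem.Dict (List Int) Int))
    (hn : (rest.map Prod.fst).Nodup)
    (hf : ∀ j ∈ rest.map Prod.fst, out.contains j = false) :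
    ((rest.foldl
        (fun out p =>
          if pvElems p.2 ≠ [] then
            out.insert p.1 (PySem.Dict.ofList
              ((PySem.List.pyRange 1 (((pvElems p.2).length : Int) + 1) 1).flatMap
                (fun k => (pvCombos (pvElems p.2) k.toNat).map (fun c => (c, (1 : Int))))))
          else out)
        out).items).map (fun q => (q.1, q.2.items))
      = out.items.map (fun q => (q.1, q.2.items)) ++ rest.filterMap pvEntry := by
  induction rest generalizing out with
  | nil => simp
  | cons p rest ih =>
    rw [List.map_cons] at hn
    have hp : out.contains p.1 = false := hf p.1 (by simp)
    rw [List.foldl_cons]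
    by_cases hm : pvElems p.2 = []
    · rw [if_neg (by simp [hm])]
      rw [ih out hn.of_cons (fun j hj => hf j (by simp [hj]))]
      have : pvEntry p = none := by
        simp [pvEntry, (pvMatched_nil_iff p.2).mpr hm]
      rw [List.filterMap_cons, this]
    · have hP : ((PySem.List.pyRange 1 (((pvElems p.2).length : Int) + 1) 1).flatMap
          (fun k => (pvCombos (pvElems p.2) k.toNat).map (fun c => (c, (1 : Int)))))
          = (pvMatched p.2).map (fun c => (c, (1 : Int))) := by
        rw [pvMatched_eq, List.map_flatMap]
      have hD : PySem.Dict.ofList ((pvMatched p.2).map (fun c => (c, (1 : Int))))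
          = PySem.Dict.mk ((pvMatched p.2).map (fun c => (c, (1 : Int)))) := by
        apply PySem.Dict.ext
        show (((pvMatched p.2).map (fun c => (c, (1 : Int)))).foldl
            (fun d q => d.insert q.1 q.2) PySem.Dict.empty).items = _
        rw [pvDict_ofList_fresh _ PySem.Dict.empty
          (by simpa [List.map_map, Function.comp_def] using pvMatched_nodup p.2)
          (by intro j _; exact PySem.Dict.contains_empty j)]
        rfl
      rw [if_pos (by simp [hm]), hP, hD]
      rw [ih (out.insert p.1 (PySem.Dict.mk ((pvMatched p.2).map (fun c => (c, (1 : Int))))))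
        hn.of_cons
        (by
          intro j hj
          have hne : j ≠ p.1 := by
            rintro rfl; exact (List.nodup_cons.mp hn).1 hj
          simp [PySem.Dict.contains_insert, hne, hf j (by simp [hj])])]
      rw [PySem.Dict.items_insert_of_not_contains (h := hp)]
      have : pvEntry p = some (p.1, (pvMatched p.2).map (fun c => (c, (1 : Int)))) := by
        simp [pvEntry, hm, pvMatched_nil_iff]
      rw [List.filterMap_cons, this]
      simp

lemma pvA_eq (rd : List (Int × List Int)) (hpre : (rd.map Prod.fst).Nodup) :
    check_all_combinations rd = rd.filterMap pvEntry := by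
  simp only [check_all_combinations]
  rw [pvCombsSet_eq]
  simp only [pvIssubset_eq]
  rw [pvOuter_A rd PySem.Dict.empty hpre (fun j _ => PySem.Dict.contains_empty j)]
  rfl

lemma pvB_eq (rd : List (Int × List Int)) (hpre : (rd.map Prod.fst).Nodup) :
    check_all_combinations_alt rd = rd.filterMap pvEntry := by
  simp only [check_all_combinations_alt, pvContains_ofList]
  have h := pvOuter_B rd PySem.Dict.empty hpre (fun j _ => PySem.Dict.contains_empty j)
  simp only [pvElems] at h
  rw [h]
  rfl

-- ===== VERDICT (by name: the statement is the Claim_ definition above) =====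
theorem check_all_combinations_spec : Claim_equal_check_all_combinations := by
  intro rd _ hpre
  unfold Spec_check_all_combinations
  rw [pvA_eq rd hpre, pvB_eq rd hpre]
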